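-- pv_equiv track=rewrite | github.com/WilkerSebastian/algorithm-review-python | vetor/lista2/repetido.py | search
-- ===== SOURCE A (Python) =====
-- def search(array, repetido):
--
--     newArray = []
--     tabela_hash = {}
--
--     for elemento in array:
--         if elemento in tabela_hash:
--             tabela_hash[elemento] += 1
--         else:
--             tabela_hash[elemento] = 1
--
--     for chave, valor in tabela_hash.items():
--         if valor > 1 and repetido:
--             newArray.append(chave)
--         elif valor == 1 and not repetido:
--             newArray.append(chave)
--
--     return newArray
-- ===== SOURCE B (Python) =====
-- def search(array, repetido):
--     seen = set()
--     newArray = []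
--     for elemento in array:
--         if elemento not in seen:
--             seen.add(elemento)
--             c = array.count(elemento)
--             if (c > 1 and repetido) or (c == 1 and not repetido):
--                 newArray.append(elemento)
--     return newArray
-- ===== Notes on version B (the rewrite author's own statement) =====
-- stated objective: alternative
-- what changed: Replaces A's two-phase build-a-frequency-dict-then-filter-its-items with a single pass over the array that dedups via a seen-set and recounts each first occurrence with array.count.
import Mathlib
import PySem

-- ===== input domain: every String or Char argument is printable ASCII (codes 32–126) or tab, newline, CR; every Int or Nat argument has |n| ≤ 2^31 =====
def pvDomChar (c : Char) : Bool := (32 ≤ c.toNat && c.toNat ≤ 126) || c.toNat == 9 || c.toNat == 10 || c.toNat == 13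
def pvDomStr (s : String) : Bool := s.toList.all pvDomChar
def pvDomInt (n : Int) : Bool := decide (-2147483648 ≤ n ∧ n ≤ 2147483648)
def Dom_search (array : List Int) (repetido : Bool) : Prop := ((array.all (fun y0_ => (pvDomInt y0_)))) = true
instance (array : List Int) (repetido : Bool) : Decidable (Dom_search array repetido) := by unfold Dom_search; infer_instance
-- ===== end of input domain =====

-- B replaces A's frequency-dict-then-filter with a single dedup pass that recounts via array.count; objective: alternative (same result, different strategy).

-- ===== PORT A =====
def search (array : List Int) (repetido : Bool) : List Int :=
  let tabela_hash : PySem.Dict Int Int :=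
    array.foldl (fun d elemento =>
      if d.contains elemento then d.insert elemento (d.getD elemento 0 + 1)
      else d.insert elemento 1) PySem.Dict.empty
  tabela_hash.items.foldl (fun newArray kv =>
    if kv.2 > 1 && repetido then newArray ++ [kv.1]
    else if kv.2 == 1 && !repetido then newArray ++ [kv.1]
    else newArray) []

-- ===== PORT B =====
def search_alt (array : List Int) (repetido : Bool) : List Int :=
  (array.foldl (fun (st : PySem.Set Int × List Int) elemento =>
      if st.1.contains elemento then st
      else
        let c : Int := (array.count elemento : Int)
        (st.1.add elemento,
         if (c > 1 && repetido) || (c == 1 && !repetido) then st.2 ++ [elemento] else st.2))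
    (PySem.Set.empty, [])).2

-- ===== PRECONDITION & SPEC =====
def Spec_search (array : List Int) (repetido : Bool) (out : List Int) : Prop := out = search_alt array repetido
instance (array : List Int) (repetido : Bool) (out : List Int) : Decidable (Spec_search array repetido out) := by unfold Spec_search; infer_instance

-- ===== CLAIM (what is proved, stated in full; the proofs are below) =====
def Claim_equal_search : Prop := ∀ (array : List Int) (repetido : Bool), Dom_search array repetido → Spec_search array repetido (search array repetido)

-- ===== LEMMAS AND PROOFS =====

-- A's counting loop is Counter(array): when the key is absent, getD … 0 = 0, so both branches insert getD+1.
theorem searchA_dict_eq_counter (array : List Int) :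
    array.foldl (fun d elemento =>
      if d.contains elemento then d.insert elemento (d.getD elemento 0 + 1)
      else d.insert elemento 1) PySem.Dict.empty = PySem.Dict.counter array := by
  have hstep : ∀ (d : PySem.Dict Int Int) (e : Int),
      (if d.contains e then d.insert e (d.getD e 0 + 1) else d.insert e 1)
        = d.insert e (d.getD e 0 + 1) := by
    intro d e
    by_cases h : d.contains e = true
    · simp [h]
    · simp only [Bool.not_eq_true] at h
      simp [h, PySem.Dict.getD_of_not_contains]
  calc array.foldl (fun d e =>
          if d.contains e then d.insert e (d.getD e 0 + 1) else d.insert e 1) PySem.Dict.empty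
      = array.foldl (fun d e => d.insert e (d.getD e 0 + 1)) PySem.Dict.empty := by
        congr 1; funext d e; exact hstep d e
    _ = PySem.Dict.counter array := PySem.Dict.foldl_insert_getD_add_one_eq_counter array

-- append-if fold is a filter
theorem foldl_append_if_filter (cond : Int → Bool) :
    ∀ (l acc : List Int),
      l.foldl (fun acc x => if cond x then acc ++ [x] else acc) acc = acc ++ l.filter cond := by
  intro l
  induction l with
  | nil => intro acc; simp
  | cons x t ih =>
      intro acc
      by_cases h : cond x = true
      · simp [List.foldl, h, ih]
      · simp only [Bool.not_eq_true] at h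
        simp [List.foldl, h, ih]

-- B's loop invariant: starting from (s, s.filter cond), the fold produces the updated seen set and its filter.
theorem searchB_loop (cond : Int → Bool) (l : List Int) : ∀ (s : PySem.Set Int),
    l.foldl (fun (st : PySem.Set Int × List Int) e =>
        if st.1.contains e then st
        else (st.1.add e, if cond e then st.2 ++ [e] else st.2))
      (s, s.filter cond)
    = (PySem.Set.update s l, (PySem.Set.update s l).filter cond) := by
  induction l with
  | nil => intro s; simp [PySem.Set.update]
  | cons e t ih =>
      intro s
      have hupd : PySem.Set.update s (e :: t) = PySem.Set.update (s.add e) t := by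
        simp [PySem.Set.update, List.foldl]
      by_cases h : PySem.Set.contains s e = true
      · have hmem : e ∈ s := (PySem.Set.contains_iff s e).mp h
        have hadd : s.add e = s := by simp [PySem.Set.add, hmem]
        simp only [List.foldl, h, hupd, hadd]
        simpa [hadd] using ih s
      · have hnmem : e ∉ s := fun m => h ((PySem.Set.contains_iff s e).mpr m)
        have hadd : s.add e = s ++ [e] := by simp [PySem.Set.add, hnmem]
        have hfil : (s.add e).filter cond = if cond e then s.filter cond ++ [e] else s.filter cond := by
          by_cases hc : cond e = true
          · simp [hadd, List.filter_append, hc]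
          · simp only [Bool.not_eq_true] at hc
            simp [hadd, List.filter_append, hc]
        simp only [List.foldl]
        rw [if_neg h, hupd, ← hfil]
        exact ih (s.add e)

-- the two per-key conditions coincide
theorem cond_merge (r : Bool) (v : Int) (acc : List Int) (k : Int) :
    (if v > 1 && r then acc ++ [k] else if v == 1 && !r then acc ++ [k] else acc)
      = (if (v > 1 && r) || (v == 1 && !r) then acc ++ [k] else acc) := by
  by_cases h1 : (decide (v > 1) && r) = true
  · simp [h1]
  · by_cases h2 : ((v == 1) && !r) = true
    · simp only [Bool.not_eq_true] at h1
      simp [h1, h2]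
    · simp only [Bool.not_eq_true] at h1 h2
      simp [h1, h2]

theorem search_eq_filter (array : List Int) (r : Bool) :
    search array r
      = (PySem.Set.ofList array).filter
          (fun k => ((array.count k : Int) > 1 && r) || ((array.count k : Int) == 1 && !r)) := by
  unfold search
  simp only [searchA_dict_eq_counter, PySem.Dict.items_counter, List.foldl_map]
  have : ∀ (acc : List Int) (k : Int),
      (if (array.count k : Int) > 1 && r then acc ++ [k]
       else if (array.count k : Int) == 1 && !r then acc ++ [k] else acc)
        = (if ((array.count k : Int) > 1 && r) || ((array.count k : Int) == 1 && !r)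
           then acc ++ [k] else acc) := fun acc k => cond_merge r _ acc k
  calc (PySem.Set.ofList array).foldl
        (fun acc k =>
          if (array.count k : Int) > 1 && r then acc ++ [k]
          else if (array.count k : Int) == 1 && !r then acc ++ [k] else acc) []
      = (PySem.Set.ofList array).foldl
        (fun acc k =>
          if ((array.count k : Int) > 1 && r) || ((array.count k : Int) == 1 && !r)
          then acc ++ [k] else acc) [] := by
        congr 1; funext acc k; exact this acc k
    _ = _ := by
        rw [foldl_append_if_filter]; simp

theorem search_alt_eq_filter (array : List Int) (r : Bool) :
    search_alt array r
      = (PySem.Set.ofList array).filter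
          (fun k => ((array.count k : Int) > 1 && r) || ((array.count k : Int) == 1 && !r)) := by
  unfold search_alt
  have h := searchB_loop
    (fun k => ((array.count k : Int) > 1 && r) || ((array.count k : Int) == 1 && !r))
    array PySem.Set.empty
  have hofList : PySem.Set.update (PySem.Set.empty : PySem.Set Int) array = PySem.Set.ofList array := by
    simp [PySem.Set.update, PySem.Set.ofList_eq_foldl, PySem.Set.empty]
  simp only [hofList] at h
  have hinit : (List.filter (fun k => ((array.count k : Int) > 1 && r) || ((array.count k : Int) == 1 && !r))
      (PySem.Set.empty : PySem.Set Int)) = ([] : List Int) := by simp [PySem.Set.empty]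
  rw [show (PySem.Set.empty, ([] : List Int))
        = ((PySem.Set.empty : PySem.Set Int),
           (PySem.Set.empty : PySem.Set Int).filter
             (fun k => ((array.count k : Int) > 1 && r) || ((array.count k : Int) == 1 && !r))) by rw [hinit]]
  rw [h]

-- ===== VERDICT (by name: the statement is the Claim_ definition above) =====
theorem search_spec : Claim_equal_search := by
  intro array repetido _
  unfold Spec_search
  rw [search_eq_filter, search_alt_eq_filter]
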